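-- pv_equiv track=rewrite | github.com/Noe-Bosc-Haddad/Quantum-bell-tests-for-contextual-queries | pipelineMatthieu.py | fill_HAL_matrix
-- ===== SOURCE A (Python) =====
-- WASTEWORDS = [
--     "the", "a", "an", "this", "that", "these", "those",
--     "he", "she", "they", "it", "we", "you", "him", "her", "them", "us",
--     "I", "me", "myself", "himself", "herself", "themselves", "itself",
--     "and", "or", "but", "so", "yet", "for", "nor",
--     "in", "on", "at", "by", "with", "about", "into", "over", "under", "between", "through",
--     "is", "are", "was", "were", "be", "being", "been", "have", "has", "had",
--     "do", "does", "did", "will", "would", "should", "can", "could", "may", "might", "must", "shall",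
--     "very", "really", "just", "too", "quite", "almost", "nearly", "always", "never", "sometimes", "often",
--     "not", "no", "yes", "all", "some", "any", "each", "every", "both", "either", "neither"
-- ]
--
-- def fill_HAL_matrix(document,hal_dict_matrix,window_size):
--     window_size_updated = window_size
--     len_doc = len(document)
--     for i in range(len_doc):
--         word = document[i]
--         if i+window_size >=len_doc:
--            window_size_updated += -1
--         if not (word in WASTEWORDS) :
--             for k in range(1,window_size_updated+1):
--                     word2 = document[i+k]
--                     if not (word2 in WASTEWORDS):
--                          hal_dict_matrix[word][word2] += window_size-k+1
--     return hal_dict_matrix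
--
-- word2 = "states"
-- ===== SOURCE B (Python) =====
-- WASTEWORDS = [
--     "the", "a", "an", "this", "that", "these", "those",
--     "he", "she", "they", "it", "we", "you", "him", "her", "them", "us",
--     "I", "me", "myself", "himself", "herself", "themselves", "itself",
--     "and", "or", "but", "so", "yet", "for", "nor",
--     "in", "on", "at", "by", "with", "about", "into", "over", "under", "between", "through",
--     "is", "are", "was", "were", "be", "being", "been", "have", "has", "had",
--     "do", "does", "did", "will", "would", "should", "can", "could", "may", "might", "must", "shall",
--     "very", "really", "just", "too", "quite", "almost", "nearly", "always", "never", "sometimes", "often",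
--     "not", "no", "yes", "all", "some", "any", "each", "every", "both", "either", "neither"
-- ]
--
-- def fill_HAL_matrix(document, hal_dict_matrix, window_size):
--     # stage 1: sparse index of non-stopword positions
--     keep = [i for i, w in enumerate(document) if w not in WASTEWORDS]
--     # stage 2: aggregate the distance weights per (word, word2) pair
--     totals = {}
--     rest = keep
--     while rest:
--         i, rest = rest[0], rest[1:]
--         for j in rest:
--             if window_size < j - i:
--                 break
--             key = (document[i], document[j])
--             totals[key] = totals.get(key, 0) + (window_size - (j - i) + 1)
--     # stage 3: one bulk application of the aggregated totals
--     for (w1, w2), v in totals.items():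
--         hal_dict_matrix[w1][w2] += v
--     return hal_dict_matrix
-- ===== Notes on version B (the rewrite author's own statement) =====
-- stated objective: alternative
-- what changed: B works in three staged passes instead of A's in-place per-pair updates under a shrinking window counter: it first builds a sparse index of non-stopword positions, then aggregates the distance weights into a (word, word2) -> total dictionary scanning only that index, and finally applies the aggregated totals to the matrix in one bulk pass.
-- outside the precondition, e.g. on fill_HAL_matrix(['cat', 'dog'], {}, 1): A raises KeyError, B raises KeyError
import Mathlib
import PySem

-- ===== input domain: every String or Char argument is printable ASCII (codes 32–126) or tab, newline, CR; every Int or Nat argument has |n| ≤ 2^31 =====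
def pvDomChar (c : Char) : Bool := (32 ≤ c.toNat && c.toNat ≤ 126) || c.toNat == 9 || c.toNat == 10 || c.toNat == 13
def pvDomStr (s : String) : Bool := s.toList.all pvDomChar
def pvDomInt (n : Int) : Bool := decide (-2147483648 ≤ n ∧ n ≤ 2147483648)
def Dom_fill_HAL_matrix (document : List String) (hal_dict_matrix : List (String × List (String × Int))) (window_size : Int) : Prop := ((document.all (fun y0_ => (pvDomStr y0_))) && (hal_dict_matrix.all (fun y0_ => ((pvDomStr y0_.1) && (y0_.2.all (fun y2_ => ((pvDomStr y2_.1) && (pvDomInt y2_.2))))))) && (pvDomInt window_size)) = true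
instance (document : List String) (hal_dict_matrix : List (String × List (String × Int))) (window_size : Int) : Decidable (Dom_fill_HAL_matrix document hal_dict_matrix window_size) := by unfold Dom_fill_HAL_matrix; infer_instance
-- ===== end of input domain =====

-- B replaces A's in-place per-pair matrix updates under a shrinking window counter with three
-- staged passes: a sparse index of non-stopword positions, a (word,word2) → total-weight
-- aggregation dictionary, and one bulk application of the totals ("alternative" objective).
-- Both the Python A and B mutate hal_dict_matrix in place and return it; the equivalence
-- proved here is about the returned value.

def pvWaste : List String := [
  "the", "a", "an", "this", "that", "these", "those",
  "he", "she", "they", "it", "we", "you", "him", "her", "them", "us",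
  "I", "me", "myself", "himself", "herself", "themselves", "itself",
  "and", "or", "but", "so", "yet", "for", "nor",
  "in", "on", "at", "by", "with", "about", "into", "over", "under", "between", "through",
  "is", "are", "was", "were", "be", "being", "been", "have", "has", "had",
  "do", "does", "did", "will", "would", "should", "can", "could", "may", "might", "must", "shall",
  "very", "really", "just", "too", "quite", "almost", "nearly", "always", "never", "sometimes", "often",
  "not", "no", "yes", "all", "some", "any", "each", "every", "both", "either", "neither"]

-- `row[w] += v` on the first entry with key w; exact whenever the key is present
-- (Pre_ guarantees that; on a missing key Python raises KeyError, this is a no-op).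
def pvUpdRow : List (String × Int) → String → Int → List (String × Int)
  | [], _, _ => []
  | (k, x) :: t, w, v => if k == w then (k, x + v) :: t else (k, x) :: pvUpdRow t w v

-- `d[w1][w2] += v`; exact whenever both keys are present (guaranteed by Pre_).
def pvUpdCell : List (String × List (String × Int)) → String → String → Int → List (String × List (String × Int))
  | [], _, _, _ => []
  | (k, row) :: t, w1, w2, v =>
      if k == w1 then (k, pvUpdRow row w2 v) :: t else (k, row) :: pvUpdCell t w1 w2 v

-- ===== PORT A =====
def fill_HAL_matrix (document : List String) (hal_dict_matrix : List (String × List (String × Int))) (window_size : Int) : List (String × List (String × Int)) :=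
  let len_doc : Int := (document.length : Int)
  ((PySem.List.pyRange 0 len_doc 1).foldl
    (fun (st : Int × List (String × List (String × Int))) i =>
      let word := PySem.List.pyGetD document i ""
      let wsu : Int := if i + window_size ≥ len_doc then st.1 - 1 else st.1
      if word ∈ pvWaste then (wsu, st.2)
      else (wsu,
        (PySem.List.pyRange 1 (wsu + 1) 1).foldl
          (fun d k =>
            let word2 := PySem.List.pyGetD document (i + k) ""
            if word2 ∈ pvWaste then d
            else pvUpdCell d word word2 (window_size - k + 1)) st.2))
    (window_size, hal_dict_matrix)).2

-- ===== PORT B =====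
-- keep = [i for i, w in enumerate(document) if w not in WASTEWORDS]
def pvKeep (document : List String) : List Int :=
  (PySem.List.enumerate document).filterMap (fun p => if p.2 ∈ pvWaste then none else some p.1)

-- the inner `for j in rest: if window_size < j - i: break; totals[key] = totals.get(key,0) + …`
def pvInnerB (document : List String) (ws i : Int) :
    List Int → PySem.Dict (String × String) Int → PySem.Dict (String × String) Int
  | [], t => t
  | j :: js, t =>
    if ws < j - i then t
    else
      let key := (PySem.List.pyGetD document i "", PySem.List.pyGetD document j "")
      pvInnerB document ws i js (t.insert key (t.getD key 0 + (ws - (j - i) + 1)))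

-- the outer `while rest: i, rest = rest[0], rest[1:] …`
def pvOuterB (document : List String) (ws : Int) :
    List Int → PySem.Dict (String × String) Int → PySem.Dict (String × String) Int
  | [], t => t
  | i :: rest, t => pvOuterB document ws rest (pvInnerB document ws i rest t)

def fill_HAL_matrix_alt (document : List String) (hal_dict_matrix : List (String × List (String × Int))) (window_size : Int) : List (String × List (String × Int)) :=
  let keep := pvKeep document
  let totals := pvOuterB document window_size keep PySem.Dict.empty
  totals.items.foldl (fun h p => pvUpdCell h p.1.1 p.1.2 p.2) hal_dict_matrix

-- ===== PRECONDITION & SPEC =====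
def pvHasCell (d : List (String × List (String × Int))) (w1 w2 : String) : Bool :=
  match d.find? (fun p => p.1 == w1) with
  | some (_, row) => row.any (fun q => q.1 == w2)
  | none => false

-- Pre_ excludes exactly the inputs where the Python A raises: an IndexError when
-- window_size exceeds len(document) and some word is not a waste word (the inner loop
-- then reads past the end), and a KeyError when a co-occurring non-waste pair within
-- the window is missing from hal_dict_matrix.
def Pre_fill_HAL_matrix (document : List String) (hal_dict_matrix : List (String × List (String × Int))) (window_size : Int) : Prop :=
  (window_size ≤ (document.length : Int) ∨ ∀ w ∈ document, w ∈ pvWaste) ∧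
  (∀ i ∈ List.range document.length, ∀ j ∈ List.range document.length,
     i < j → (j : Int) ≤ (i : Int) + window_size →
     document.getD i "" ∉ pvWaste → document.getD j "" ∉ pvWaste →
     pvHasCell hal_dict_matrix (document.getD i "") (document.getD j "") = true)
instance (document : List String) (hal_dict_matrix : List (String × List (String × Int))) (window_size : Int) : Decidable (Pre_fill_HAL_matrix document hal_dict_matrix window_size) := by unfold Pre_fill_HAL_matrix; infer_instance

def pvWitness_fill_HAL_matrix : List String × (List (String × List (String × Int))) × Int :=
  (["cat", "the", "dog"],
   [("cat", [("cat", 0), ("dog", 1)]), ("dog", [("cat", 2), ("dog", 0)])],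
   2)

def Spec_fill_HAL_matrix (document : List String) (hal_dict_matrix : List (String × List (String × Int))) (window_size : Int) (out : List (String × List (String × Int))) : Prop := out = fill_HAL_matrix_alt document hal_dict_matrix window_size
instance (document : List String) (hal_dict_matrix : List (String × List (String × Int))) (window_size : Int) (out : List (String × List (String × Int))) : Decidable (Spec_fill_HAL_matrix document hal_dict_matrix window_size out) := by unfold Spec_fill_HAL_matrix; infer_instance

-- ===== CLAIM (what is proved, stated in full; the proofs are below) =====
def Claim_equal_fill_HAL_matrix : Prop := ∀ (document : List String) (hal_dict_matrix : List (String × List (String × Int))) (window_size : Int), Dom_fill_HAL_matrix document hal_dict_matrix window_size → Pre_fill_HAL_matrix document hal_dict_matrix window_size → Spec_fill_HAL_matrix document hal_dict_matrix window_size (fill_HAL_matrix document hal_dict_matrix window_size)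

-- ===== LEMMAS AND PROOFS =====

-- A weighted pair triple ((word, word2), weight) and the two elementary operations the
-- proof factors both programs through: applying one triple to the matrix, and bumping
-- one triple into the aggregation dictionary.
def pvTri (document : List String) (ws i j : Int) : (String × String) × Int :=
  ((PySem.List.pyGetD document i "", PySem.List.pyGetD document j ""), ws - (j - i) + 1)

def pvApplyE (h : List (String × List (String × Int))) (p : (String × String) × Int) :
    List (String × List (String × Int)) := pvUpdCell h p.1.1 p.1.2 p.2

def pvBump (t : PySem.Dict (String × String) Int) (p : (String × String) × Int) :
    PySem.Dict (String × String) Int := t.insert p.1 (t.getD p.1 0 + p.2)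

-- A's per-pair operation: pair p = (i, k) adds ws - k + 1 to cell (document[i], document[i+k])
-- when both words are non-waste.
def pvOp (document : List String) (ws : Int)
    (d : List (String × List (String × Int))) (p : Int × Int) : List (String × List (String × Int)) :=
  if PySem.List.pyGetD document p.1 "" ∉ pvWaste ∧ PySem.List.pyGetD document (p.1 + p.2) "" ∉ pvWaste
  then pvUpdCell d (PySem.List.pyGetD document p.1 "") (PySem.List.pyGetD document (p.1 + p.2) "") (ws - p.2 + 1)
  else d

def pvToTri? (document : List String) (ws : Int) (p : Int × Int) : Option ((String × String) × Int) :=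
  if PySem.List.pyGetD document p.1 "" ∉ pvWaste ∧ PySem.List.pyGetD document (p.1 + p.2) "" ∉ pvWaste
  then some (pvTri document ws p.1 (p.1 + p.2)) else none

theorem pvUpdRow_comm (r : List (String × Int)) (b e : String) (x y : Int) :
    pvUpdRow (pvUpdRow r b x) e y = pvUpdRow (pvUpdRow r e y) b x := by
  induction r with
  | nil => rfl
  | cons h t ih =>
    obtain ⟨k, v⟩ := h
    by_cases hb : (k == b) = true <;> by_cases he : (k == e) = true <;>
      first
        | (simp [pvUpdRow, hb, he, ih]; omega)
        | simp [pvUpdRow, hb, he, ih]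

theorem pvUpdCell_comm (d : List (String × List (String × Int))) (a b c e : String) (x y : Int) :
    pvUpdCell (pvUpdCell d a b x) c e y = pvUpdCell (pvUpdCell d c e y) a b x := by
  induction d with
  | nil => rfl
  | cons h t ih =>
    obtain ⟨k, row⟩ := h
    by_cases ha : (k == a) = true <;> by_cases hc : (k == c) = true <;>
      simp [pvUpdCell, ha, hc, ih, pvUpdRow_comm]

theorem pvUpdRow_add (r : List (String × Int)) (b : String) (x y : Int) :
    pvUpdRow (pvUpdRow r b x) b y = pvUpdRow r b (x + y) := by
  induction r with
  | nil => rfl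
  | cons h t ih =>
    obtain ⟨k, v⟩ := h
    by_cases hb : (k == b) = true <;>
      first
        | (simp [pvUpdRow, hb, ih]; omega)
        | simp [pvUpdRow, hb, ih]

theorem pvUpdCell_add (d : List (String × List (String × Int))) (a b : String) (x y : Int) :
    pvUpdCell (pvUpdCell d a b x) a b y = pvUpdCell d a b (x + y) := by
  induction d with
  | nil => rfl
  | cons h t ih =>
    obtain ⟨k, row⟩ := h
    by_cases ha : (k == a) = true <;> simp [pvUpdCell, ha, ih, pvUpdRow_add]

theorem pvApplyE_comm (h : List (String × List (String × Int))) (p q : (String × String) × Int) :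
    pvApplyE (pvApplyE h p) q = pvApplyE (pvApplyE h q) p := by
  simp [pvApplyE, pvUpdCell_comm]

-- pulling one triple application across a fold of triple applications
theorem pvFoldl_applyE_comm (l : List ((String × String) × Int))
    (h : List (String × List (String × Int))) (p : (String × String) × Int) :
    l.foldl pvApplyE (pvApplyE h p) = pvApplyE (l.foldl pvApplyE h) p := by
  induction l generalizing h with
  | nil => rfl
  | cons q t ih => simp only [List.foldl_cons, pvApplyE_comm h p q, ih]

-- ===== A-side characterisation =====

def pvStepA (document : List String) (window_size : Int)
    (st : Int × List (String × List (String × Int))) (i : Int) : Int × List (String × List (String × Int)) :=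
  let word := PySem.List.pyGetD document i ""
  let wsu : Int := if i + window_size ≥ (document.length : Int) then st.1 - 1 else st.1
  if word ∈ pvWaste then (wsu, st.2)
  else (wsu,
    (PySem.List.pyRange 1 (wsu + 1) 1).foldl
      (fun d k =>
        let word2 := PySem.List.pyGetD document (i + k) ""
        if word2 ∈ pvWaste then d
        else pvUpdCell d word word2 (window_size - k + 1)) st.2)

theorem pvFillA_eq (document : List String) (hal : List (String × List (String × Int))) (ws : Int) :
    fill_HAL_matrix document hal ws
      = ((PySem.List.pyRange 0 (document.length : Int) 1).foldl (pvStepA document ws) (ws, hal)).2 := rfl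

theorem pvInnerA (document : List String) (ws : Int) (i m : Int)
    (d : List (String × List (String × Int))) (hw : PySem.List.pyGetD document i "" ∉ pvWaste) :
    (PySem.List.pyRange 1 (m + 1) 1).foldl
      (fun d k =>
        let word2 := PySem.List.pyGetD document (i + k) ""
        if word2 ∈ pvWaste then d
        else pvUpdCell d (PySem.List.pyGetD document i "") word2 (ws - k + 1)) d
    = ((PySem.List.pyRange 1 (m + 1) 1).map (fun k => (i, k))).foldl (pvOp document ws) d := by
  rw [List.foldl_map]
  refine PySem.List.foldl_congr_mem' _ _ _ _ ?_
  intro k _ acc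
  simp only [pvOp, hw]
  by_cases h2 : PySem.List.pyGetD document (i + k) "" ∈ pvWaste <;> simp [h2]

theorem pvInnerA_waste (document : List String) (ws : Int) (i : Int) (ks : List Int)
    (d : List (String × List (String × Int))) (hw : PySem.List.pyGetD document i "" ∈ pvWaste) :
    (ks.map (fun k => (i, k))).foldl (pvOp document ws) d = d := by
  induction ks generalizing d with
  | nil => rfl
  | cons k t ih => simp only [List.map_cons, List.foldl_cons, pvOp, hw]; simp [ih]

-- A's pair list from position c on (i-major, effective window min(ws+1, n-i) exclusive)
def pvPairs (document : List String) (ws c : Int) : List (Int × Int) :=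
  (PySem.List.pyRange c (document.length : Int) 1).flatMap
    (fun i => (PySem.List.pyRange 1 (min (ws + 1) ((document.length : Int) - i)) 1).map (fun k => (i, k)))

-- the invariant: entering iteration a, window_size_updated = min ws (n - a)
theorem pvA_inv (document : List String) (ws : Int) (hws : ws ≤ (document.length : Int))
    (a : Int) (ha : 0 ≤ a) (_han : a ≤ (document.length : Int))
    (d : List (String × List (String × Int))) :
    ((PySem.List.pyRange a (document.length : Int) 1).foldl (pvStepA document ws)
            (min ws ((document.length : Int) - a), d)).2
      = ((pvPairs document ws a).foldl (pvOp document ws) d) := by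
  unfold pvPairs
  by_cases hend : (document.length : Int) ≤ a
  · rw [PySem.List.pyRange_one_eq_nil hend]; rfl
  · have hend' : a < (document.length : Int) := by omega
    rw [PySem.List.pyRange_one_cons hend', List.flatMap_cons, List.foldl_cons, List.foldl_append]
    have hwsu : (if (document.length : Int) ≤ a + ws then min ws ((document.length : Int) - a) - 1
        else min ws ((document.length : Int) - a)) = min ws ((document.length : Int) - (a+1)) := by
      split_ifs <;> omega
    have hbound : min ws ((document.length : Int) - (a+1)) + 1
        = min (ws + 1) ((document.length : Int) - a) := by omega
    have hrec := pvA_inv document ws hws (a+1) (by omega) (by omega)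
    unfold pvPairs at hrec
    by_cases hw : PySem.List.pyGetD document a "" ∈ pvWaste
    · have hstep : pvStepA document ws (min ws ((document.length : Int) - a), d) a
          = (min ws ((document.length : Int) - (a+1)), d) := by
        simp only [pvStepA, ge_iff_le, hwsu]
        simp [hw]
      rw [hstep, hrec d, pvInnerA_waste document ws a _ d hw]
    · have hstep : pvStepA document ws (min ws ((document.length : Int) - a), d) a
          = (min ws ((document.length : Int) - (a+1)),
             ((PySem.List.pyRange 1 (min ws ((document.length : Int) - (a+1)) + 1) 1).map
               (fun k => (a, k))).foldl (pvOp document ws) d) := by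
        simp only [pvStepA, ge_iff_le, hwsu]
        simp only [if_neg hw]
        rw [pvInnerA document ws a _ d hw]
      rw [hstep, hbound, hrec]
termination_by ((document.length : Int) - a).toNat
decreasing_by all_goals omega

theorem pvA_char (document : List String) (hal : List (String × List (String × Int))) (ws : Int)
    (hws : ws ≤ (document.length : Int)) :
    fill_HAL_matrix document hal ws = (pvPairs document ws 0).foldl (pvOp document ws) hal := by
  rw [pvFillA_eq]
  have h0 : min ws ((document.length : Int) - 0) = ws := by omega
  have := pvA_inv document ws hws 0 le_rfl (by omega) hal
  rw [h0] at this
  simpa using this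

-- a fold of pvOp is a fold of triple applications over the extracted triples
theorem pvFoldl_op_filterMap (document : List String) (ws : Int) (l : List (Int × Int))
    (hal : List (String × List (String × Int))) :
    l.foldl (pvOp document ws) hal = (l.filterMap (pvToTri? document ws)).foldl pvApplyE hal := by
  induction l generalizing hal with
  | nil => rfl
  | cons p t ih =>
    rw [List.foldl_cons, List.filterMap_cons]
    by_cases h : PySem.List.pyGetD document p.1 "" ∉ pvWaste ∧ PySem.List.pyGetD document (p.1 + p.2) "" ∉ pvWaste
    · rw [show pvToTri? document ws p = some (pvTri document ws p.1 (p.1 + p.2)) from by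
        simp [pvToTri?, h], List.foldl_cons, ih]
      congr 1
      simp only [pvOp, if_pos h, pvApplyE, pvTri]
      congr 1
      omega
    · rw [show pvToTri? document ws p = none from by simp only [pvToTri?, if_neg h],
        show pvOp document ws hal p = hal from by simp only [pvOp, if_neg h], ih]

-- ===== B-side characterisation =====

-- B's triple list, generated suffix by suffix of the keep list
def pvTB (document : List String) (ws : Int) : List Int → List ((String × String) × Int)
  | [] => []
  | i :: rest =>
      ((rest.takeWhile (fun j => decide (j - i ≤ ws))).map (pvTri document ws i)) ++ pvTB document ws rest

theorem pvInnerB_eq (document : List String) (ws i : Int) (l : List Int)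
    (t : PySem.Dict (String × String) Int) :
    pvInnerB document ws i l t
      = ((l.takeWhile (fun j => decide (j - i ≤ ws))).map (pvTri document ws i)).foldl pvBump t := by
  induction l generalizing t with
  | nil => rfl
  | cons j js ih =>
    by_cases h : ws < j - i
    · have hd : (decide (j - i ≤ ws)) = false := by simp; omega
      simp only [pvInnerB, if_pos h, List.takeWhile_cons, hd, Bool.false_eq_true, if_false,
        List.map_nil, List.foldl_nil]
    · have hd : (decide (j - i ≤ ws)) = true := by simp; omega
      simp only [pvInnerB, if_neg h, List.takeWhile_cons, hd, if_true, List.map_cons,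
        List.foldl_cons, ih]
      rfl

theorem pvOuterB_eq (document : List String) (ws : Int) (l : List Int)
    (t : PySem.Dict (String × String) Int) :
    pvOuterB document ws l t = (pvTB document ws l).foldl pvBump t := by
  induction l generalizing t with
  | nil => rfl
  | cons i rest ih =>
    simp only [pvOuterB, pvTB, List.foldl_append, ih, pvInnerB_eq]

-- applying a bumped dictionary = applying the dictionary, then the bumped triple
theorem pvApply_bump (t : PySem.Dict (String × String) Int) (p : (String × String) × Int)
    (hnd : t.keys.Nodup) (hal : List (String × List (String × Int))) :
    ((pvBump t p).items).foldl pvApplyE hal = pvApplyE (t.items.foldl pvApplyE hal) p := by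
  by_cases hc : t.contains p.1
  · obtain ⟨v, hv⟩ : ∃ v, t.get? p.1 = some v := by
      have := PySem.Dict.contains_eq_isSome_get? t p.1
      rw [hc] at this
      exact Option.isSome_iff_exists.mp this.symm
    have hmem : (p.1, v) ∈ t.items := PySem.Dict.mem_items_of_get?_eq_some t hv
    obtain ⟨pre, post, hsplit⟩ := List.append_of_mem hmem
    have hkeys : t.keys = pre.map Prod.fst ++ p.1 :: post.map Prod.fst := by
      simp [PySem.Dict.keys, hsplit]
    rw [hkeys] at hnd
    have hpre : ∀ q ∈ pre, (q.1 == p.1) = false := by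
      intro q hq
      have : q.1 ∈ pre.map Prod.fst := List.mem_map_of_mem hq
      have hne : q.1 ≠ p.1 := by
        intro he
        exact (List.disjoint_of_nodup_append hnd) (he ▸ this) (by simp)
      simpa using hne
    have hpost : ∀ q ∈ post, (q.1 == p.1) = false := by
      intro q hq
      have : q.1 ∈ post.map Prod.fst := List.mem_map_of_mem hq
      have hnd2 := (List.nodup_append.mp hnd).2.1
      have hne : q.1 ≠ p.1 := by
        intro he
        exact (List.nodup_cons.mp hnd2).1 (he ▸ this)
      simpa using hne
    have hgetD : t.getD p.1 0 = v := PySem.Dict.getD_of_get?_eq_some t 0 hv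
    rw [pvBump, PySem.Dict.items_insert_of_contains t _ hc, hgetD, hsplit]
    rw [List.map_append, List.map_cons]
    have hmpre : pre.map (fun q => if q.1 == p.1 then (p.1, v + p.2) else q) = pre :=
      List.map_congr_left (fun q hq => by simp [hpre q hq]) |>.trans (List.map_id _)
    have hmpost : post.map (fun q => if q.1 == p.1 then (p.1, v + p.2) else q) = post :=
      List.map_congr_left (fun q hq => by simp [hpost q hq]) |>.trans (List.map_id _)
    rw [hmpre, hmpost, if_pos (by simp)]
    rw [List.foldl_append, List.foldl_cons, List.foldl_append, List.foldl_cons]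
    rw [show pvApplyE (pre.foldl pvApplyE hal) (p.1, v + p.2)
          = pvApplyE (pvApplyE (pre.foldl pvApplyE hal) (p.1, v)) (p.1, p.2) from by
        simp [pvApplyE, pvUpdCell_add]]
    rw [pvFoldl_applyE_comm]
  · have hgetD : t.getD p.1 0 = 0 := PySem.Dict.getD_of_not_contains t 0 (by simpa using hc)
    rw [pvBump, PySem.Dict.items_insert_of_not_contains t _ (by simpa using hc), hgetD,
      zero_add, List.foldl_append, List.foldl_cons, List.foldl_nil]

-- aggregating a triple list into a dictionary, then applying it, = applying the list directly
theorem pvApply_agg (l : List ((String × String) × Int)) (t : PySem.Dict (String × String) Int)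
    (hnd : t.keys.Nodup) (hal : List (String × List (String × Int))) :
    ((l.foldl pvBump t).items).foldl pvApplyE hal = l.foldl pvApplyE (t.items.foldl pvApplyE hal) := by
  induction l generalizing t hal with
  | nil => rfl
  | cons p ps ih =>
    rw [List.foldl_cons, List.foldl_cons,
      ih (pvBump t p) (PySem.Dict.nodup_keys_insert _ _ _ hnd) hal, pvApply_bump t p hnd hal]

theorem pvB_char (document : List String) (hal : List (String × List (String × Int))) (ws : Int) :
    fill_HAL_matrix_alt document hal ws = (pvTB document ws (pvKeep document)).foldl pvApplyE hal := by
  show ((pvOuterB document ws (pvKeep document) PySem.Dict.empty).items).foldl pvApplyE hal = _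
  rw [pvOuterB_eq, pvApply_agg _ _ (by simp) hal]
  rfl

-- ===== correspondence of the two pair/triple enumerations =====

-- filtering an ascending unit range by an upper bound truncates it
theorem pvFilter_pyRange_lt (a b c : Int) :
    (PySem.List.pyRange a b 1).filter (fun k => decide (k < c)) = PySem.List.pyRange a (min b c) 1 := by
  by_cases hab : b ≤ a
  · rw [PySem.List.pyRange_one_eq_nil hab, PySem.List.pyRange_one_eq_nil (by omega)]; rfl
  · have hab' : a < b := by omega
    rw [PySem.List.pyRange_one_cons hab']
    by_cases hac : a < c
    · rw [List.filter_cons_of_pos (by simpa using hac), pvFilter_pyRange_lt (a+1) b c,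
        ← PySem.List.pyRange_one_cons (lt_min hab' hac)]
    · have hm : min b c ≤ a := le_trans (min_le_right b c) (by omega)
      rw [List.filter_cons_of_neg (by simpa using hac), pvFilter_pyRange_lt (a+1) b c,
        PySem.List.pyRange_one_eq_nil (le_trans hm (by omega)),
        PySem.List.pyRange_one_eq_nil hm]
termination_by (b - a).toNat
decreasing_by all_goals omega

-- an ascending unit range is a shifted unit range
theorem pvRange_shift (c a b : Int) :
    PySem.List.pyRange a b 1 = (PySem.List.pyRange (c + a) (c + b) 1).map (fun j => j - c) := by
  by_cases hab : b ≤ a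
  · rw [PySem.List.pyRange_one_eq_nil hab, PySem.List.pyRange_one_eq_nil (by omega)]; rfl
  · have hab' : a < b := by omega
    rw [PySem.List.pyRange_one_cons hab', PySem.List.pyRange_one_cons (by omega : c + a < c + b),
      List.map_cons, pvRange_shift c (a+1) b, show c + a - c = a from by omega,
      show c + (a + 1) = c + a + 1 from by ring]
termination_by (b - a).toNat
decreasing_by all_goals omega

-- filterMap of an if-some-else-none is a map over a filter
theorem pvFilterMap_if {α β : Type} (P : α → Prop) [DecidablePred P] (f : α → β) (l : List α) :
    l.filterMap (fun x => if P x then some (f x) else none)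
      = (l.filter (fun x => decide (P x))).map f := by
  induction l with
  | nil => rfl
  | cons x t ih =>
    by_cases h : P x <;> simp [h, ih]

-- takeWhile of an upper distance bound on a filtered ascending range is a filter
theorem pvTakeWhile_filter_range (q : Int → Bool) (n c ws : Int) (a : Int) :
    ((PySem.List.pyRange a n 1).filter q).takeWhile (fun j => decide (j - c ≤ ws))
      = (PySem.List.pyRange a n 1).filter (fun j => q j && decide (j - c ≤ ws)) := by
  by_cases han : n ≤ a
  · rw [PySem.List.pyRange_one_eq_nil han]; rfl
  · have han' : a < n := by omega
    rw [PySem.List.pyRange_one_cons han']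
    by_cases hq : q a
    · by_cases hb : a - c ≤ ws
      · rw [List.filter_cons_of_pos hq, List.takeWhile_cons_of_pos (by simpa using hb),
          List.filter_cons_of_pos (by simp [hq, hb]), pvTakeWhile_filter_range q n c ws (a+1)]
      · rw [List.filter_cons_of_pos hq, List.takeWhile_cons_of_neg (by simpa using hb),
          List.filter_cons_of_neg (by simp [hb])]
        refine (List.filter_eq_nil_iff.mpr ?_).symm
        intro j hj
        have := (PySem.List.mem_pyRange_one.mp hj).1
        simp only [Bool.and_eq_true, decide_eq_true_eq, not_and]
        intro _
        omega
    · rw [List.filter_cons_of_neg (by simpa using hq),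
        List.filter_cons_of_neg (by simp [hq]), pvTakeWhile_filter_range q n c ws (a+1)]
termination_by (n - a).toNat
decreasing_by all_goals omega

-- the keep list is the filtered index range
theorem pvKeep_eq (document : List String) :
    pvKeep document
      = (PySem.List.pyRange 0 (document.length : Int) 1).filter
          (fun i => decide (PySem.List.pyGetD document i "" ∉ pvWaste)) := by
  unfold pvKeep
  rw [PySem.List.enumerate_eq_map_pyRange document "", List.filterMap_map, PySem.List.len_eq]
  rw [show ((fun p : Int × String => if p.2 ∈ pvWaste then none else some p.1) ∘
        (fun j => (j, PySem.List.pyGetD document j "")))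
      = (fun j : Int => if (PySem.List.pyGetD document j "" ∈ pvWaste) then none else some j) from rfl]
  rw [show (fun j : Int => if (PySem.List.pyGetD document j "" ∈ pvWaste) then none else some j)
      = (fun j : Int => if (PySem.List.pyGetD document j "" ∉ pvWaste) then some (id j) else none) from by
    funext j; by_cases h : PySem.List.pyGetD document j "" ∈ pvWaste <;> simp [h]]
  rw [pvFilterMap_if, List.map_id]

-- A's extracted triples from position c = B's triples over the keep suffix from c
theorem pvKey (document : List String) (ws : Int) (c : Int) (hc : 0 ≤ c) :
    (pvPairs document ws c).filterMap (pvToTri? document ws)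
      = pvTB document ws
          ((PySem.List.pyRange c (document.length : Int) 1).filter
            (fun i => decide (PySem.List.pyGetD document i "" ∉ pvWaste))) := by
  by_cases hend : (document.length : Int) ≤ c
  · unfold pvPairs
    rw [PySem.List.pyRange_one_eq_nil hend]; rfl
  · have hend' : c < (document.length : Int) := by omega
    unfold pvPairs
    rw [PySem.List.pyRange_one_cons hend', List.flatMap_cons, List.filterMap_append]
    have hrec := pvKey document ws (c+1) (by omega)
    unfold pvPairs at hrec
    by_cases hw : PySem.List.pyGetD document c "" ∈ pvWaste
    · rw [List.filter_cons_of_neg (by simpa using hw)]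
      rw [show ((PySem.List.pyRange 1 (min (ws + 1) ((document.length : Int) - c)) 1).map
            (fun k => (c, k))).filterMap (pvToTri? document ws) = [] from by
        rw [List.filterMap_map]
        refine List.filterMap_eq_nil_iff.mpr ?_
        intro k _
        simp [pvToTri?, hw]]
      rw [List.nil_append, hrec]
    · rw [List.filter_cons_of_pos (by simpa using hw)]
      rw [pvTB, hrec.symm]
      congr 1
      -- the inner triple lists agree
      rw [pvTakeWhile_filter_range, List.filterMap_map]
      rw [show ((pvToTri? document ws) ∘ (fun k => (c, k)))
          = (fun k : Int => if PySem.List.pyGetD document (c + k) "" ∉ pvWaste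
              then some (pvTri document ws c (c + k)) else none) from by
        funext k
        simp only [Function.comp, pvToTri?]
        by_cases h2 : PySem.List.pyGetD document (c + k) "" ∈ pvWaste
        · rw [if_neg (by simp [hw, h2]), if_neg (by simp [h2])]
        · rw [if_pos ⟨hw, h2⟩, if_pos h2]]
      rw [pvRange_shift c 1 (min (ws + 1) ((document.length : Int) - c)), List.filterMap_map]
      rw [show c + min (ws + 1) ((document.length : Int) - c)
            = min ((document.length : Int)) (c + ws + 1) from by omega]
      rw [show ((fun k : Int => if PySem.List.pyGetD document (c + k) "" ∉ pvWaste
              then some (pvTri document ws c (c + k)) else none) ∘ (fun j => j - c))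
          = (fun j : Int => if PySem.List.pyGetD document j "" ∉ pvWaste
              then some (pvTri document ws c j) else none) from by
        funext j
        simp only [Function.comp]
        rw [show c + (j - c) = j from by omega]]
      rw [pvFilterMap_if]
      congr 1
      rw [show (fun j : Int => (decide (PySem.List.pyGetD document j "" ∉ pvWaste)
              && decide (j - c ≤ ws)))
          = (fun j : Int => (decide (PySem.List.pyGetD document j "" ∉ pvWaste)
              && decide (j < c + ws + 1))) from by
        funext j
        congr 1
        exact decide_eq_decide.mpr (by omega)]
      rw [← List.filter_filter, pvFilter_pyRange_lt]
termination_by ((document.length : Int) - c).toNat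
decreasing_by all_goals omega

-- ===== degenerate all-waste case =====

theorem pvA_all_waste (document : List String) (ws : Int)
    (hall : ∀ w ∈ document, w ∈ pvWaste) :
    ∀ (l : List Int), (∀ i ∈ l, 0 ≤ i ∧ i < (document.length : Int)) →
    ∀ st : Int × List (String × List (String × Int)),
      (l.foldl (pvStepA document ws) st).2 = st.2 := by
  intro l
  induction l with
  | nil => intro _ st; rfl
  | cons i t ih =>
    intro hmem st
    have hi := hmem i (by simp)
    have hw : PySem.List.pyGetD document i "" ∈ pvWaste := by
      rw [PySem.List.pyGetD_eq_getElem document "" hi.1 (by exact_mod_cast hi.2)]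
      exact hall _ (List.getElem_mem _)
    rw [List.foldl_cons]
    rw [ih (fun j hj => hmem j (by simp [hj]))]
    simp [pvStepA, hw]

theorem pvKeep_all_waste (document : List String) (hall : ∀ w ∈ document, w ∈ pvWaste) :
    pvKeep document = [] := by
  rw [pvKeep_eq]
  refine List.filter_eq_nil_iff.mpr ?_
  intro i hi
  have hi' := PySem.List.mem_pyRange_one.mp hi
  have hw : PySem.List.pyGetD document i "" ∈ pvWaste := by
    rw [PySem.List.pyGetD_eq_getElem document "" hi'.1 (by omega)]
    exact hall _ (List.getElem_mem _)
  simp [hw]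

-- ===== VERDICT (by name: the statement is the Claim_ definition above) =====
theorem fill_HAL_matrix_spec : Claim_equal_fill_HAL_matrix := by
  intro document hal ws _hdom hpre
  unfold Spec_fill_HAL_matrix
  rcases hpre.1 with hws | hall
  · rw [pvA_char document hal ws hws, pvB_char, pvFoldl_op_filterMap,
      pvKey document ws 0 le_rfl, pvKeep_eq]
  · rw [pvB_char, pvKeep_all_waste document hall, pvFillA_eq]
    show _ = List.foldl pvApplyE hal (pvTB document ws [])
    rw [show pvTB document ws [] = [] from rfl, List.foldl_nil]
    exact pvA_all_waste document ws hall _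
      (fun i hi => by
        have := PySem.List.mem_pyRange_one.mp hi; exact ⟨this.1, this.2⟩) _
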